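-- pv_equiv track=rewrite | github.com/lrslab/Hammerhead-motif | hammermotif/motif_merger.py | _is_very_similar_or_contained
-- ===== SOURCE A (Python) =====
-- def _is_very_similar_or_contained(motif1: str, motif2: str) -> bool:
--     """Check if motifs are very similar or one contains the other completely."""
--     # Exact match
--     if motif1 == motif2:
--         return True
--
--     # Check for core substring relationships
--     # If one motif is a core substring of another (length >= 6)
--     if len(motif1) >= 6 and motif1 in motif2:
--         return True
--     elif len(motif2) >= 6 and motif2 in motif1:
--         return True
--
--     # For shorter motifs, require more difference in length
--     if motif1 in motif2 and len(motif1) < len(motif2) - 2: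
--         return True
--     elif motif2 in motif1 and len(motif2) < len(motif1) - 2:
--         return True
--
--     # Check for shared core (e.g., CAGAAG in CAGAAGTA and CAGAAGG)
--     if len(motif1) >= 6 and len(motif2) >= 6:
--         # Find longest common substring
--         for length in range(min(len(motif1), len(motif2)), 5, -1):
--             for i in range(len(motif1) - length + 1):
--                 substr = motif1[i:i + length]
--                 if substr in motif2 and length >= 6:
--                     return True
--
--     # Very high similarity for same-length motifs
--     if len(motif1) == len(motif2):
--         diff_count = sum(1 for a, b in zip(motif1, motif2) if a != b)
--         if diff_count <= 1:  # At most 1 difference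
--             return True
--
--     return False
-- ===== SOURCE B (Python) =====
-- def _is_very_similar_or_contained(motif1: str, motif2: str) -> bool:
--     """Check if motifs are very similar or one contains the other completely."""
--     if motif1 == motif2:
--         return True
--
--     # Containment: a long (>=6) motif inside the other, or a much shorter one inside.
--     if motif1 in motif2 and (len(motif1) >= 6 or len(motif1) < len(motif2) - 2):
--         return True
--     if motif2 in motif1 and (len(motif2) >= 6 or len(motif2) < len(motif1) - 2):
--         return True
--
--     # Shared core: a common substring of length >= 6 exists iff a common 6-mer exists.
--     if len(motif1) >= 6 and len(motif2) >= 6: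
--         kmers1 = {motif1[i:i + 6] for i in range(len(motif1) - 5)}
--         if any(motif2[j:j + 6] in kmers1 for j in range(len(motif2) - 5)):
--             return True
--
--     # Very high similarity for same-length motifs
--     if len(motif1) == len(motif2):
--         return sum(a != b for a, b in zip(motif1, motif2)) <= 1
--
--     return False
-- ===== Notes on version B (the rewrite author's own statement) =====
-- stated objective: faster
-- what changed: Replaces A's triple-nested longest-common-substring search (all lengths from min(len) down to 6, all start positions, substring scan) by a single pass that builds the set of 6-mers of motif1 and checks motif2's 6-mers against it (a common substring of length >= 6 exists iff a common 6-mer exists), and merges A's four containment checks into two.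
import Mathlib
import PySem

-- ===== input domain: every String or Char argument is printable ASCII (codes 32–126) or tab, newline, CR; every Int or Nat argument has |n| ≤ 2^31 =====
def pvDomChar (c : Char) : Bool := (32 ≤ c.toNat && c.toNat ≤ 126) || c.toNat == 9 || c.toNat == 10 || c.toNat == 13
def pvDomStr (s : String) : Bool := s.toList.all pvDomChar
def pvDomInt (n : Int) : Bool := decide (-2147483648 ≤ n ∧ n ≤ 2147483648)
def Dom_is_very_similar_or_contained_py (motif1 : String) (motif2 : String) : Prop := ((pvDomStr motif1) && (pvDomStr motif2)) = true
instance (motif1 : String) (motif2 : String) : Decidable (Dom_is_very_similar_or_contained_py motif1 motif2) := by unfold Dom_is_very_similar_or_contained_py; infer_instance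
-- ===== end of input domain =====

-- B replaces A's cubic all-lengths common-substring search by a single shared-6-mer set check
-- (any common substring of length ≥ 6 contains a common 6-mer) and merges the containment tests; objective: faster.

-- ===== PORT A =====
def is_very_similar_or_contained_py (motif1 : String) (motif2 : String) : Bool :=
  let m1 := motif1.toList
  let m2 := motif2.toList
  if m1 == m2 then true
  else if decide (6 ≤ m1.length) && PySem.Chars.isIn m1 m2 then true
  else if decide (6 ≤ m2.length) && PySem.Chars.isIn m2 m1 then true
  else if PySem.Chars.isIn m1 m2 && decide ((m1.length : Int) < (m2.length : Int) - 2) then true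
  else if PySem.Chars.isIn m2 m1 && decide ((m2.length : Int) < (m1.length : Int) - 2) then true
  else if decide (6 ≤ m1.length) && decide (6 ≤ m2.length) &&
      (PySem.List.pyRange (min (m1.length : Int) (m2.length : Int)) 5 (-1)).any (fun len =>
        (PySem.List.pyRange 0 ((m1.length : Int) - len + 1) 1).any (fun i =>
          PySem.Chars.isIn (PySem.List.slice m1 (some i) (some (i + len))) m2 && decide (6 ≤ len)))
    then true
  else if m1.length == m2.length &&
      decide (((List.zip m1 m2).map (fun p => if p.1 ≠ p.2 then (1 : Int) else 0)).sum ≤ 1)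
    then true
  else false

-- ===== PORT B =====
def is_very_similar_or_contained_py_alt (motif1 : String) (motif2 : String) : Bool :=
  let m1 := motif1.toList
  let m2 := motif2.toList
  if m1 == m2 then true
  else if PySem.Chars.isIn m1 m2 &&
      (decide (6 ≤ m1.length) || decide ((m1.length : Int) < (m2.length : Int) - 2)) then true
  else if PySem.Chars.isIn m2 m1 &&
      (decide (6 ≤ m2.length) || decide ((m2.length : Int) < (m1.length : Int) - 2)) then true
  else if decide (6 ≤ m1.length) && decide (6 ≤ m2.length) &&
      (let kmers1 := PySem.Set.ofList ((List.range (m1.length - 5)).map (fun i => (m1.drop i).take 6));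
       (List.range (m2.length - 5)).any (fun j => kmers1.contains ((m2.drop j).take 6)))
    then true
  else if m1.length == m2.length then
    decide ((List.zip m1 m2).countP (fun p => p.1 != p.2) ≤ 1)
  else false

-- ===== PRECONDITION & SPEC =====
def Spec_is_very_similar_or_contained_py (motif1 : String) (motif2 : String) (out : Bool) : Prop := out = is_very_similar_or_contained_py_alt motif1 motif2
instance (motif1 : String) (motif2 : String) (out : Bool) : Decidable (Spec_is_very_similar_or_contained_py motif1 motif2 out) := by unfold Spec_is_very_similar_or_contained_py; infer_instance

-- ===== CLAIM (what is proved, stated in full; the proofs are below) =====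
def Claim_equal_is_very_similar_or_contained_py : Prop := ∀ (motif1 : String) (motif2 : String), Dom_is_very_similar_or_contained_py motif1 motif2 → Spec_is_very_similar_or_contained_py motif1 motif2 (is_very_similar_or_contained_py motif1 motif2)

-- ===== LEMMAS AND PROOFS =====

-- A's nested all-lengths common-substring search succeeds iff the two strings share a 6-mer.
theorem core_search_eq (m1 m2 : List Char) (h1 : 6 ≤ m1.length) (h2 : 6 ≤ m2.length) :
    ((PySem.List.pyRange (min (m1.length : Int) (m2.length : Int)) 5 (-1)).any (fun len =>
        (PySem.List.pyRange 0 ((m1.length : Int) - len + 1) 1).any (fun i =>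
          PySem.Chars.isIn (PySem.List.slice m1 (some i) (some (i + len))) m2 && decide (6 ≤ len))))
    = decide (∃ j < m2.length - 5, ∃ i < m1.length - 5,
        List.take 6 (List.drop i m1) = List.take 6 (List.drop j m2)) := by
  rw [Bool.eq_iff_iff]
  simp only [List.any_eq_true, Bool.and_eq_true, decide_eq_true_eq,
    PySem.List.mem_pyRange_neg_one, PySem.List.mem_pyRange_one]
  constructor
  · rintro ⟨len, ⟨h5, hmin⟩, i, ⟨hi0, hiu⟩, hin, h6⟩
    rw [PySem.Chars.isIn_iff_infix] at hin
    have hlen1 : (len : Int) ≤ m1.length := le_trans hmin (min_le_left _ _)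
    have hiu' : i + len ≤ (m1.length : Int) := by omega
    rw [PySem.List.slice_toNat m1 hi0 (by omega)] at hin
    have htoNat : (i + len).toNat - i.toNat = len.toNat := by omega
    rw [htoNat] at hin
    obtain ⟨pre, suf, hm2⟩ := hin
    set s := (m1.drop i.toNat).take len.toNat with hs
    have hslen : s.length = len.toNat := by
      simp [hs, List.length_take, List.length_drop]; omega
    refine ⟨pre.length, ?_, i.toNat, ?_, ?_⟩
    · have : pre.length + s.length + suf.length = m2.length := by
        rw [← hm2]; simp; omega
      omega
    · omega
    · have hdrop : m2.drop pre.length = s ++ suf := by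
        rw [← hm2, List.append_assoc, List.drop_left]
      rw [hdrop, List.take_append_of_le_length (by omega), hs, List.take_take]
      congr 1
      omega
  · rintro ⟨j, hj, i, hi, heq⟩
    refine ⟨6, ⟨by norm_num, by omega⟩, (i : Int), ⟨by positivity, by omega⟩, ?_, by norm_num⟩
    have : ((i : Int) + 6) = ((i : Int) + ((6 : Nat) : Int)) := by norm_num
    rw [this, PySem.List.slice_natCast_add, heq, PySem.Chars.isIn_iff_infix]
    exact ((m2.drop j).take_prefix 6).isInfix.trans (m2.drop_suffix j).isInfix

-- Same-length difference count: A's 0/1 integer sum is the count of mismatched positions.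
theorem diff_sum_eq_countP (l : List (Char × Char)) :
    (List.map (fun p => if p.1 = p.2 then (0 : Int) else 1) l).sum
      = (List.countP (fun p => p.1 != p.2) l : Int) := by
  have h := PySem.List.sum_map_ite_one_zero (fun p : Char × Char => p.1 != p.2) l
  simpa [bne_iff_ne, ite_not] using h

-- ===== VERDICT (by name: the statement is the Claim_ definition above) =====
theorem is_very_similar_or_contained_py_spec : Claim_equal_is_very_similar_or_contained_py := by
  intro motif1 motif2 _
  show is_very_similar_or_contained_py motif1 motif2 = is_very_similar_or_contained_py_alt motif1 motif2
  unfold is_very_similar_or_contained_py is_very_similar_or_contained_py_alt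
  set m1 := motif1.toList with hm1
  set m2 := motif2.toList with hm2
  by_cases hEq : m1 == m2
  · simp [hEq]
  by_cases h61 : 6 ≤ m1.length <;> by_cases h62 : 6 ≤ m2.length <;>
    cases hin12 : PySem.Chars.isIn m1 m2 <;> cases hin21 : PySem.Chars.isIn m2 m1 <;>
      simp [hEq, h61, h62, hin12, hin21, diff_sum_eq_countP, Nat.cast_le_one] <;>
      rw [core_search_eq m1 m2 h61 h62]
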